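-- pv_equiv track=rewrite | github.com/lazarchitect/AdventOfCode | AoC_2019/4.py | containsRepeat
-- ===== SOURCE A (Python) =====
-- def containsRepeat(s):
--     for i in range(len(s)):
--         if(i!=0) and (s[i] == s[i-1]):
--             if(i!=len(s)-1) and (s[i] == s[i+1]):
--                 continue
--             else:
--                 return True
--     return False
-- ===== SOURCE B (Python) =====
-- def containsRepeat(s):
--     # run-length encode s (newest run kept at the front), then ask for any run of length >= 2
--     runs = []
--     for c in s:
--         if runs and runs[0][0] == c:
--             runs[0] = (c, runs[0][1] + 1)
--         else:
--             runs.insert(0, (c, 1))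
--     return any(n >= 2 for _, n in runs)
-- ===== Notes on version B (the rewrite author's own statement) =====
-- stated objective: alternative
-- what changed: B run-length-encodes the string into (char,count) runs in one fold and then checks whether any run has length >= 2, instead of A's index loop with lookback/lookahead comparisons and early return.
import Mathlib
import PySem

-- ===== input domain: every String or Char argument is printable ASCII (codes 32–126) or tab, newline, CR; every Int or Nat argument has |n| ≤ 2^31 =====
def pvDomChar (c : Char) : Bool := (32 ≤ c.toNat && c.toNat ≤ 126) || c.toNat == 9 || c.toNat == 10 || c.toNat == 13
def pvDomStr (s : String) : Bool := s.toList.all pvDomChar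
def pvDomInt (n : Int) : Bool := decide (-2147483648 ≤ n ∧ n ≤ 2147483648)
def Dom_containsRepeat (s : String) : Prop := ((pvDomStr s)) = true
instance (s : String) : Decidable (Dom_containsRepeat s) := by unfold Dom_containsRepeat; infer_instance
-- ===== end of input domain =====

-- B re-implements A as a run-length encoding pass followed by an 'any run has length ≥ 2' check;
-- return values agree on all strings (both are total).

-- ===== PORT A =====
-- the 'for i in range(len(s))' loop with its two early-return branches, i counting up
def aLoop (cs : List Char) (i : Nat) : Bool :=
  if _h : i < cs.length then
    if (i != 0) && (cs.getD i ' ' == cs.getD (i - 1) ' ') then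
      if (i != cs.length - 1) && (cs.getD i ' ' == cs.getD (i + 1) ' ') then
        aLoop cs (i + 1)
      else true
    else aLoop cs (i + 1)
  else false
termination_by cs.length - i

def containsRepeat (s : String) : Bool := aLoop s.toList 0

-- ===== PORT B =====
-- one step of B's loop body: extend the front run or start a new one
def bStep (runs : List (Char × Int)) (c : Char) : List (Char × Int) :=
  match runs with
  | (d, n) :: rest => if d == c then (c, n + 1) :: rest else (c, 1) :: (d, n) :: rest
  | [] => [(c, 1)]

def containsRepeat_alt (s : String) : Bool :=
  let runs := s.toList.foldl bStep []
  runs.any (fun p => decide (2 ≤ p.2))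

-- ===== PRECONDITION & SPEC =====
def Spec_containsRepeat (s : String) (out : Bool) : Prop := out = containsRepeat_alt s
instance (s : String) (out : Bool) : Decidable (Spec_containsRepeat s out) := by unfold Spec_containsRepeat; infer_instance

-- ===== CLAIM (what is proved, stated in full; the proofs are below) =====
def Claim_equal_containsRepeat : Prop := ∀ (s : String), Dom_containsRepeat s → Spec_containsRepeat s (containsRepeat s)

-- ===== LEMMAS AND PROOFS =====

-- common characterisation: some adjacent equal pair exists
def pairExists : List Char → Bool
  | a :: b :: t => (a == b) || pairExists (b :: t)
  | _ => false

theorem pairExists_short (cs : List Char) (h : cs.length ≤ 1) : pairExists cs = false := by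
  match cs with
  | [] => rfl
  | [a] => rfl
  | a :: b :: t => simp at h

theorem pairExists_drop (cs : List Char) (i : Nat) (h1 : 1 ≤ i) (h : i < cs.length) :
    pairExists (cs.drop (i - 1)) =
      ((cs.getD (i - 1) ' ' == cs.getD i ' ') || pairExists (cs.drop i)) := by
  obtain ⟨j, rfl⟩ : ∃ j, i = j + 1 := ⟨i - 1, by omega⟩
  have hj : j < cs.length := by omega
  simp only [Nat.add_sub_cancel]
  rw [List.drop_eq_getElem_cons hj, List.drop_eq_getElem_cons h]
  simp [pairExists, List.getD_eq_getElem?_getD, List.getElem?_eq_getElem hj,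
    List.getElem?_eq_getElem h, ← List.drop_eq_getElem_cons h]

theorem aLoop_eq (cs : List Char) (i : Nat) (hi : 1 ≤ i) :
    aLoop cs i = pairExists (cs.drop (i - 1)) := by
  by_cases h : i < cs.length
  · rw [aLoop]
    simp only [h, dif_pos]
    have hne : (i != 0) = true := by simp; omega
    have hIH : aLoop cs (i + 1) = pairExists (cs.drop i) := by
      have := aLoop_eq cs (i + 1) (by omega)
      simpa using this
    rw [pairExists_drop cs i hi h]
    by_cases hb : cs.getD i ' ' = cs.getD (i - 1) ' '
    · have houter : (i != 0 && cs.getD i ' ' == cs.getD (i - 1) ' ') = true := by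
        rw [Bool.and_eq_true]
        exact ⟨hne, by rw [beq_iff_eq]; exact hb⟩
      rw [if_pos houter]
      have hRHS : (cs.getD (i - 1) ' ' == cs.getD i ' ') = true := by
        rw [beq_iff_eq]; exact hb.symm
      rw [hRHS, Bool.true_or]
      by_cases hin : (i != cs.length - 1 && cs.getD i ' ' == cs.getD (i + 1) ' ') = true
      · rw [if_pos hin, hIH]
        have hin' := Bool.and_eq_true _ _ |>.mp hin
        have hi1 : i + 1 < cs.length := by
          have := bne_iff_ne.mp hin'.1
          omega
        have hd := pairExists_drop cs (i + 1) (by omega) hi1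
        simp only [Nat.add_sub_cancel] at hd
        rw [hd, hin'.2, Bool.true_or]
      · rw [if_neg hin]
    · have hb0 : (cs.getD i ' ' == cs.getD (i - 1) ' ') = false := beq_eq_false_iff_ne.mpr hb
      have hb0' : (cs.getD (i - 1) ' ' == cs.getD i ' ') = false :=
        beq_eq_false_iff_ne.mpr (fun hc => hb hc.symm)
      have houter : (i != 0 && cs.getD i ' ' == cs.getD (i - 1) ' ') = false := by
        rw [hb0, Bool.and_false]
      rw [if_neg (by rw [houter]; exact Bool.false_ne_true), hIH, hb0', Bool.false_or]
  · rw [aLoop]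
    simp only [h, dif_neg, not_false_iff]
    rw [pairExists_short]
    simp at h
    simp
    omega
termination_by cs.length - i

theorem aLoop_zero (cs : List Char) : aLoop cs 0 = pairExists cs := by
  rcases cs with _ | ⟨c, t⟩
  · rw [aLoop]; simp [pairExists]
  · rw [aLoop]
    have h0 : 0 < (c :: t).length := by simp
    simp only [h0, dif_pos, bne_self_eq_false, Bool.false_and]
    have := aLoop_eq (c :: t) 1 le_rfl
    simpa using this

theorem bFold (cs : List Char) (d : Char) (n : Int) (rest : List (Char × Int)) (hn : 1 ≤ n) :
    ((cs.foldl bStep ((d, n) :: rest)).any (fun p => decide (2 ≤ p.2))) =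
      (decide (2 ≤ n) || rest.any (fun p => decide (2 ≤ p.2)) || pairExists (d :: cs)) := by
  induction cs generalizing d n rest with
  | nil => simp [pairExists]
  | cons c t ih =>
    by_cases hc : d = c
    · subst hc
      simp only [List.foldl_cons, bStep, beq_self_eq_true, if_true]
      rw [ih d (n + 1) rest (by omega)]
      have h2 : decide (2 ≤ n + 1) = true := by simp; omega
      simp [pairExists, h2]
    · have hbe : (d == c) = false := by simp [hc]
      simp only [List.foldl_cons, bStep, hbe, Bool.false_eq_true, if_false]
      rw [ih c 1 ((d, n) :: rest) (by omega)]
      simp [pairExists, hbe, Bool.or_assoc]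

theorem alt_eq_pairExists (s : String) : containsRepeat_alt s = pairExists s.toList := by
  unfold containsRepeat_alt
  rcases hs : s.toList with _ | ⟨c, t⟩
  · simp [pairExists]
  · simp only [List.foldl_cons, bStep]
    rw [bFold t c 1 [] (by omega)]
    simp

-- ===== VERDICT (by name: the statement is the Claim_ definition above) =====
theorem containsRepeat_spec : Claim_equal_containsRepeat := by
  intro s _
  unfold Spec_containsRepeat containsRepeat
  rw [alt_eq_pairExists, aLoop_zero]
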